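-- pv_equiv track=rewrite | github.com/DooDuZ/sparta_python | hanghae/day7/prob8.py | solution
-- ===== SOURCE A (Python) =====
-- from heapq import heapify, heappop, heappush
--
-- def solution(params):
--     answer = []
--
--     heap = []
--     heapify(heap)
--
--     # python heapq에 순서가 있는 데이터가 삽입되는 경우, 앞의 데이터부터 순차적으로 비교한다
--     for param in params:
--         if param == 0:
--             if heap:
--                 answer.append(str(heappop(heap)[1]))
--             else:
--                 answer.append(str(0))
--             continue
--
--         # 절대값과 원본 값을 같이 push
--         heappush(heap, [abs(param), param])
--
--     return answer
-- ===== SOURCE B (Python) =====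
-- def solution(params):
--     answer = []
--     pending = []  # list of (abs(param), param), kept sorted ascending at all times
--
--     for param in params:
--         if param == 0:
--             if pending:
--                 answer.append(str(pending.pop(0)[1]))
--             else:
--                 answer.append('0')
--             continue
--
--         # insert (abs, original) at its sorted position (after equals), by binary search
--         item = (abs(param), param)
--         lo, hi = 0, len(pending)
--         while lo < hi:
--             mid = (lo + hi) // 2
--             if item < pending[mid]:
--                 hi = mid
--             else:
--                 lo = mid + 1
--         pending.insert(lo, item)
--
--     return answer
-- ===== Notes on version B (the rewrite author's own statement) =====
-- stated objective: alternative
-- what changed: Replaced the heapq binary heap with a pending list kept sorted at insertion time via a hand-written binary-search insert; extraction becomes pop(0) of the sorted list.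
import Mathlib
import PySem

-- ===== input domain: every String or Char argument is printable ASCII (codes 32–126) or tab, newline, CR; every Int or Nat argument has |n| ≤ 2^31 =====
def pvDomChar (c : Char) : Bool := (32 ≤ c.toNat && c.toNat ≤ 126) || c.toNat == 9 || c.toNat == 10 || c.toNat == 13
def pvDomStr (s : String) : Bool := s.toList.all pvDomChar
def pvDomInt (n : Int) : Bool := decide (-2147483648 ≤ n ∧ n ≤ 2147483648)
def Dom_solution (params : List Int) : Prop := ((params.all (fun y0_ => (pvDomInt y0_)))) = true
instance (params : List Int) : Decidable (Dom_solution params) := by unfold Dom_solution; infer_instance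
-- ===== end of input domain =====

-- B replaces the heapq binary heap by a pending list kept sorted at insertion time
-- (binary-search insert), popping index 0 on extraction; same return value, no speed claim.

-- ===== PORT A =====
-- Python compares the two-element lists [abs(p), p] lexicographically: first < first,
-- or equal firsts and second < second. pltB is exactly that comparison on pairs.
def pltB (x y : Int × Int) : Bool := x.1 < y.1 || (x.1 == y.1 && x.2 < y.2)

-- CPython heapq._siftdown(heap, startpos, pos) with newitem = heap[pos] read out once
-- (faithful hand port; heapq is not covered by PySem). Indices stay in range in every
-- actual call, so getD's default is never read.
def siftdownLoop (heap : List (Int × Int)) (startpos pos : Nat) (newitem : Int × Int) :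
    List (Int × Int) :=
  if startpos < pos then
    let parentpos := (pos - 1) / 2
    let parent := heap.getD parentpos (0, 0)
    if pltB newitem parent then
      siftdownLoop (heap.set pos parent) startpos parentpos newitem
    else heap.set pos newitem
  else heap.set pos newitem
termination_by pos
decreasing_by omega

-- CPython heapq.heappush: append, then _siftdown(heap, 0, len(heap)-1)
def heappush (heap : List (Int × Int)) (item : Int × Int) : List (Int × Int) :=
  siftdownLoop (heap ++ [item]) 0 heap.length item

-- the while-loop of CPython heapq._siftup: move the smaller child up until a leaf
def siftupLoop (heap : List (Int × Int)) (pos childpos endpos : Nat) :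
    List (Int × Int) × Nat :=
  if childpos < endpos then
    let childpos :=
      if childpos + 1 < endpos ∧
          ¬ pltB (heap.getD childpos (0, 0)) (heap.getD (childpos + 1) (0, 0)) then
        childpos + 1
      else childpos
    siftupLoop (heap.set pos (heap.getD childpos (0, 0))) childpos (2 * childpos + 1) endpos
  else (heap, pos)
termination_by endpos - childpos
decreasing_by split <;> omega

-- CPython heapq._siftup(heap, pos)
def siftup (heap : List (Int × Int)) (pos : Nat) : List (Int × Int) :=
  let newitem := heap.getD pos (0, 0)
  let r := siftupLoop heap pos (2 * pos + 1) heap.length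
  siftdownLoop (r.1.set r.2 newitem) pos r.2 newitem

-- CPython heapq.heappop, returning (popped item, new heap)
def heappop (heap : List (Int × Int)) : (Int × Int) × List (Int × Int) :=
  let lastelt := heap.getLastD (0, 0)
  let rest := heap.dropLast
  if rest.isEmpty then (lastelt, rest)
  else (rest.getD 0 (0, 0), siftup (rest.set 0 lastelt) 0)

-- the for-loop of A over params, state = the heap
def solLoopA (params : List Int) (heap : List (Int × Int)) : List String :=
  match params with
  | [] => []
  | p :: ps =>
    if p = 0 then
      if heap.isEmpty then PySem.Int.toStr 0 :: solLoopA ps heap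
      else
        let r := heappop heap
        PySem.Int.toStr r.1.2 :: solLoopA ps r.2
    else solLoopA ps (heappush heap (|p|, p))

def solution (params : List Int) : List String := solLoopA params []

-- ===== PORT B =====
-- the while lo < hi binary-search loop of Source B ((lo+hi)//2 on naturals is Nat division)
def bisLoop (pending : List (Int × Int)) (item : Int × Int) (lo hi : Nat) : Nat :=
  if lo < hi then
    let mid := (lo + hi) / 2
    if pltB item (pending.getD mid (0, 0)) then bisLoop pending item lo mid
    else bisLoop pending item (mid + 1) hi
  else lo
termination_by hi - lo
decreasing_by all_goals omega

-- the for-loop of B over params, state = the sorted pending list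
-- (pending.insert(lo, item) with 0 ≤ lo ≤ len is List.insertIdx lo item)
def solLoopB (params : List Int) (pending : List (Int × Int)) : List String :=
  match params with
  | [] => []
  | p :: ps =>
    if p = 0 then
      match pending with
      | [] => "0" :: solLoopB ps []
      | q :: qs => PySem.Int.toStr q.2 :: solLoopB ps qs
    else
      let item := (|p|, p)
      solLoopB ps (pending.insertIdx (bisLoop pending item 0 pending.length) item)

def solution_alt (params : List Int) : List String := solLoopB params []

-- ===== PRECONDITION & SPEC =====
def Spec_solution (params : List Int) (out : List String) : Prop := out = solution_alt params
instance (params : List Int) (out : List String) : Decidable (Spec_solution params out) := by unfold Spec_solution; infer_instance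

-- ===== CLAIM (what is proved, stated in full; the proofs are below) =====
def Claim_equal_solution : Prop := ∀ (params : List Int), Dom_solution params → Spec_solution params (solution params)

-- ===== LEMMAS AND PROOFS =====

-- element access with default, as used by the ports
def gP (h : List (Int × Int)) (i : Nat) : Int × Int := h.getD i (0, 0)

-- order facts about the pair comparison
lemma plt_iff (x y : Int × Int) :
    pltB x y = true ↔ (x.1 < y.1 ∨ (x.1 = y.1 ∧ x.2 < y.2)) := by
  simp [pltB]

lemma plt_false_iff (x y : Int × Int) :
    pltB x y = false ↔ ¬ (x.1 < y.1 ∨ (x.1 = y.1 ∧ x.2 < y.2)) := by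
  rw [← Bool.not_eq_true, plt_iff]

lemma plt_irrefl (x : Int × Int) : pltB x x = false := by
  rw [plt_false_iff]; omega

lemma plt_asymm {x y : Int × Int} (h : pltB x y = true) : pltB y x = false := by
  rw [plt_iff] at h; rw [plt_false_iff]; omega

lemma ple_antisymm {x y : Int × Int} (h1 : pltB x y = false) (h2 : pltB y x = false) :
    x = y := by
  rw [plt_false_iff] at h1 h2
  obtain ⟨x1, x2⟩ := x; obtain ⟨y1, y2⟩ := y
  simp only [Prod.mk.injEq]
  constructor <;> omega

-- a ≤ b ≤ c → a ≤ c, phrased as pltB _ _ = false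
lemma ple_trans {a b c : Int × Int} (h1 : pltB b a = false) (h2 : pltB c b = false) :
    pltB c a = false := by
  rw [plt_false_iff] at h1 h2 ⊢; omega

-- a < b ≤ c → a < c
lemma plt_of_plt_of_ple {a b c : Int × Int} (h1 : pltB a b = true) (h2 : pltB c b = false) :
    pltB a c = true := by
  rw [plt_iff] at h1 ⊢; rw [plt_false_iff] at h2; omega

-- getD bookkeeping
lemma gP_eq_getElem (h : List (Int × Int)) (i : Nat) (hi : i < h.length) :
    gP h i = h[i] := by
  simp [gP, List.getD_eq_getElem?_getD, List.getElem?_eq_getElem hi]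

lemma gP_set_ne (h : List (Int × Int)) {i j : Nat} (a : Int × Int) (hne : i ≠ j) :
    gP (h.set i a) j = gP h j := by
  simp [gP, List.getD_eq_getElem?_getD, List.getElem?_set_ne hne]

lemma gP_set_self (h : List (Int × Int)) {i : Nat} (a : Int × Int) (hi : i < h.length) :
    gP (h.set i a) i = a := by
  simp [gP, List.getD_eq_getElem?_getD, hi]

lemma gP_append_lt (h : List (Int × Int)) (x : Int × Int) {i : Nat} (hi : i < h.length) :
    gP (h ++ [x]) i = gP h i := by
  simp [gP, List.getD_eq_getElem?_getD, List.getElem?_append_left hi]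

lemma gP_mem (h : List (Int × Int)) {i : Nat} (hi : i < h.length) : gP h i ∈ h := by
  rw [gP_eq_getElem h i hi]; exact List.getElem_mem hi

-- counting through set
lemma count_set (l : List (Int × Int)) (n : Nat) (b a : Int × Int) (hn : n < l.length) :
    (l.set n b).count a + (if gP l n = a then 1 else 0)
      = l.count a + (if b = a then 1 else 0) := by
  induction l generalizing n with
  | nil => simp at hn
  | cons x xs ih =>
    cases n with
    | zero => simp [gP, List.count_cons]; split_ifs <;> omega
    | succ m =>
      have := ih m (by simpa using hn)
      have hg : gP (x :: xs) (m + 1) = gP xs m := by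
        simp [gP, List.getD_eq_getElem?_getD]
      simp only [List.set_cons_succ, List.count_cons, hg]
      split_ifs at this ⊢ <;> omega

lemma set_set_perm (l : List (Int × Int)) {i j : Nat} (b : Int × Int)
    (hi : i < l.length) (hj : j < l.length) (hne : i ≠ j) :
    ((l.set i (gP l j)).set j b).Perm (l.set i b) := by
  rw [List.perm_iff_count]
  intro a
  have h1 := count_set (l.set i (gP l j)) j b a (by simpa using hj)
  have h2 := count_set l i (gP l j) a hi
  have h3 := count_set l i b a hi
  rw [gP_set_ne l (gP l j) hne] at h1
  omega

-- the heap invariant: every non-root is ≥ its parent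
def IsHeap (h : List (Int × Int)) : Prop :=
  ∀ i, 0 < i → i < h.length → pltB (gP h i) (gP h ((i - 1) / 2)) = false

-- invariant of siftdownLoop (hole at pos, inserting x):
-- all other parent/child pairs are ordered, and the children of the hole
-- dominate x and (when the hole is not the root) the hole's parent
def SDInv (h : List (Int × Int)) (pos : Nat) (x : Int × Int) : Prop :=
  pos < h.length ∧
  (∀ j, 0 < j → j < h.length → j ≠ pos → pltB (gP h j) (gP h ((j - 1) / 2)) = false) ∧
  (∀ j, 0 < j → j < h.length → (j - 1) / 2 = pos →
    pltB (gP h j) x = false ∧ (0 < pos → pltB (gP h j) (gP h ((pos - 1) / 2)) = false))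

lemma gP_def (h : List (Int × Int)) (i : Nat) : h.getD i (0, 0) = gP h i := rfl

set_option maxHeartbeats 1000000 in
lemma siftdown_spec : ∀ (pos : Nat) (h : List (Int × Int)) (x : Int × Int),
    SDInv h pos x →
    IsHeap (siftdownLoop h 0 pos x) ∧ (siftdownLoop h 0 pos x).Perm (h.set pos x) := by
  intro pos
  induction pos using Nat.strong_induction_on with
  | _ pos ih =>
  intro h x hinv
  obtain ⟨hlen, hii, hiii⟩ := hinv
  rw [siftdownLoop]
  by_cases hp : 0 < pos
  · rw [if_pos hp]
    simp only [gP_def]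
    by_cases hcmp : pltB x (gP h ((pos - 1) / 2)) = true
    · rw [if_pos hcmp]
      have hppos : (pos - 1) / 2 < pos := by omega
      have hinv' : SDInv (h.set pos (gP h ((pos - 1) / 2))) ((pos - 1) / 2) x := by
        refine ⟨by simp; omega, ?_, ?_⟩
        · intro j hj0 hjl hjne
          simp only [List.length_set] at hjl
          by_cases hjp : j = pos
          · rw [hjp, gP_set_self h _ hlen, gP_set_ne h _ (by omega)]
            exact plt_irrefl _
          · by_cases hpj : (j - 1) / 2 = pos
            · rw [gP_set_ne h _ (by omega), hpj, gP_set_self h _ hlen]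
              exact (hiii j hj0 hjl hpj).2 hp
            · rw [gP_set_ne h _ (by omega), gP_set_ne h _ (by omega)]
              exact hii j hj0 hjl hjp
        · intro j hj0 hjl hjpar
          simp only [List.length_set] at hjl
          have hgp : (((pos - 1) / 2) - 1) / 2 ≠ pos := by omega
          by_cases hjp : j = pos
          · rw [hjp, gP_set_self h _ hlen, gP_set_ne h _ (by omega)]
            refine ⟨plt_asymm hcmp, fun hq => ?_⟩
            exact hii ((pos - 1) / 2) hq (by omega) (by omega)
          · rw [gP_set_ne h _ (by omega), gP_set_ne h _ (by omega)]
            have hj' : pltB (gP h j) (gP h ((pos - 1) / 2)) = false := by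
              have := hii j hj0 hjl hjp
              rwa [hjpar] at this
            refine ⟨plt_asymm (plt_of_plt_of_ple hcmp hj'), fun hq => ?_⟩
            exact ple_trans (hii ((pos - 1) / 2) hq (by omega) (by omega)) hj'
      obtain ⟨H1, H2⟩ := ih ((pos - 1) / 2) hppos _ x hinv'
      refine ⟨H1, H2.trans ?_⟩
      exact set_set_perm h x hlen (by omega) (by omega)
    · rw [if_neg hcmp]
      have hcf : pltB x (gP h ((pos - 1) / 2)) = false := by
        exact Bool.not_eq_true _ ▸ (by simpa using hcmp)
      refine ⟨?_, List.Perm.refl _⟩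
      intro i hi0 hil
      simp only [List.length_set] at hil
      by_cases hip : i = pos
      · rw [hip, gP_set_self h _ hlen, gP_set_ne h _ (by omega)]
        exact hcf
      · by_cases hpi : (i - 1) / 2 = pos
        · rw [gP_set_ne h _ (by omega), hpi, gP_set_self h _ hlen]
          exact (hiii i hi0 hil hpi).1
        · rw [gP_set_ne h _ (by omega), gP_set_ne h _ (by omega)]
          exact hii i hi0 hil hip
  · rw [if_neg hp]
    have hp0 : pos = 0 := by omega
    subst hp0
    refine ⟨?_, List.Perm.refl _⟩
    intro i hi0 hil
    simp only [List.length_set] at hil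
    by_cases hpi : (i - 1) / 2 = 0
    · rw [gP_set_ne h _ (by omega), hpi, gP_set_self h _ hlen]
      exact (hiii i hi0 hil hpi).1
    · rw [gP_set_ne h _ (by omega), gP_set_ne h _ (by omega)]
      exact hii i hi0 hil (by omega)

lemma set_append_len (h : List (Int × Int)) (x y : Int × Int) :
    (h ++ [x]).set h.length y = h ++ [y] := by
  induction h with
  | nil => rfl
  | cons a t ih => simp [ih]

lemma heappush_spec (h : List (Int × Int)) (x : Int × Int) (hh : IsHeap h) :
    IsHeap (heappush h x) ∧ (heappush h x).Perm (x :: h) := by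
  have hinv : SDInv (h ++ [x]) h.length x := by
    refine ⟨by simp, ?_, ?_⟩
    · intro j hj0 hjl hjne
      simp only [List.length_append, List.length_cons, List.length_nil] at hjl
      have hjh : j < h.length := by omega
      rw [gP_append_lt h x hjh, gP_append_lt h x (by omega)]
      exact hh j hj0 hjh
    · intro j hj0 hjl hjpar
      simp only [List.length_append, List.length_cons, List.length_nil] at hjl
      omega
  obtain ⟨H1, H2⟩ := siftdown_spec h.length (h ++ [x]) x hinv
  refine ⟨H1, H2.trans ?_⟩
  rw [set_append_len]
  exact List.perm_append_singleton x h

-- invariant of siftupLoop (hole at pos): all pairs not involving the hole are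
-- ordered, and the hole's children dominate the hole's parent
def SUInv (h : List (Int × Int)) (pos : Nat) : Prop :=
  pos < h.length ∧
  (∀ j, 0 < j → j < h.length → j ≠ pos → (j - 1) / 2 ≠ pos →
    pltB (gP h j) (gP h ((j - 1) / 2)) = false) ∧
  (∀ j, 0 < j → j < h.length → (j - 1) / 2 = pos → 0 < pos →
    pltB (gP h j) (gP h ((pos - 1) / 2)) = false)

-- what siftupLoop establishes: same length, the hole r.2 is an in-range leaf,
-- every other parent/child pair is ordered, and filling the hole is a set at pos
def SUPost (h : List (Int × Int)) (pos : Nat) (r : List (Int × Int) × Nat) : Prop :=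
  r.1.length = h.length ∧ r.2 < h.length ∧ h.length ≤ 2 * r.2 + 1 ∧
  (∀ j, 0 < j → j < h.length → j ≠ r.2 →
    pltB (gP r.1 j) (gP r.1 ((j - 1) / 2)) = false) ∧
  (∀ b, (r.1.set r.2 b).Perm (h.set pos b))

lemma siftupLoop_go : ∀ (n cp : Nat) (h : List (Int × Int)) (pos : Nat),
    h.length - cp ≤ n → SUInv h pos → cp = 2 * pos + 1 →
    SUPost h pos (siftupLoop h pos cp h.length) := by
  intro n
  induction n with
  | zero =>
    intro cp h pos hn hinv hcp
    obtain ⟨hlen, hi, hiii⟩ := hinv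
    rw [siftupLoop, if_neg (by omega)]
    refine ⟨rfl, hlen, by omega, ?_, fun b => List.Perm.refl _⟩
    intro j hj0 hjl hjne
    exact hi j hj0 hjl hjne (by omega)
  | succ n ih =>
    intro cp h pos hn hinv hcp
    obtain ⟨hlen, hi, hiii⟩ := hinv
    by_cases hlt : cp < h.length
    · -- one iteration: pick the smaller child c, move it into the hole, recurse
      have hcsel : ∃ c, (c = cp ∨ c = cp + 1) ∧ (c - 1) / 2 = pos ∧ c < h.length ∧
          (∀ k, (k = cp ∨ k = cp + 1) → k < h.length → pltB (gP h k) (gP h c) = false) ∧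
          siftupLoop h pos cp h.length
            = siftupLoop (h.set pos (gP h c)) c (2 * c + 1) h.length := by
        by_cases hsel : cp + 1 < h.length ∧
            ¬ pltB (h.getD cp (0, 0)) (h.getD (cp + 1) (0, 0)) = true
        · refine ⟨cp + 1, Or.inr rfl, by omega, by omega, ?_, ?_⟩
          · intro k hk hkl
            have hf : pltB (gP h cp) (gP h (cp + 1)) = false := by
              have h2 := hsel.2
              rw [gP_def, gP_def] at h2
              simpa using h2
            rcases hk with hk | hk <;> rw [hk]
            · exact hf
            · exact plt_irrefl _
          · conv_lhs => rw [siftupLoop]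
            rw [if_pos hlt, if_pos hsel]
            rfl
        · refine ⟨cp, Or.inl rfl, by omega, by omega, ?_, ?_⟩
          · intro k hk hkl
            rcases hk with hk | hk <;> rw [hk]
            · exact plt_irrefl _
            · rcases Decidable.not_and_iff_or_not.mp hsel with hc | hc
              · omega
              · have ht : pltB (gP h cp) (gP h (cp + 1)) = true := by
                  rw [gP_def, gP_def] at hc
                  simpa using hc
                exact plt_asymm ht
          · conv_lhs => rw [siftupLoop]
            rw [if_pos hlt, if_neg hsel]
            rfl
      obtain ⟨c, hcv, hcpar, hcl, hmin, hstep⟩ := hcsel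
      have hposc : pos < c := by omega
      have hinv' : SUInv (h.set pos (gP h c)) c := by
        refine ⟨by simpa using hcl, ?_, ?_⟩
        · intro j hj0 hjl hjne hjpar
          simp only [List.length_set] at hjl
          by_cases hjp : j = pos
          · have hp0 : 0 < pos := by omega
            rw [hjp, gP_set_self h _ (by omega), gP_set_ne h _ (by omega)]
            exact hiii c (by omega) hcl hcpar hp0
          · by_cases hpj : (j - 1) / 2 = pos
            · have hjc : j = cp ∨ j = cp + 1 := by omega
              rw [gP_set_ne h _ (by omega), hpj, gP_set_self h _ (by omega)]
              exact hmin j hjc hjl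
            · rw [gP_set_ne h _ (by omega), gP_set_ne h _ (by omega)]
              exact hi j hj0 hjl hjp hpj
        · intro j hj0 hjl hjpar hc0
          simp only [List.length_set] at hjl
          have hjc : 2 * c + 1 ≤ j := by omega
          rw [gP_set_ne h _ (by omega), hcpar, gP_set_self h _ (by omega), ← hjpar]
          exact hi j hj0 hjl (by omega) (by omega)
      have hlen' : (h.set pos (gP h c)).length = h.length := by simp
      have hrec := ih (2 * c + 1) (h.set pos (gP h c)) c (by omega) hinv' rfl
      simp only [SUPost] at hrec
      rw [hlen'] at hrec
      obtain ⟨R1, R2, R3, R4, R5⟩ := hrec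
      rw [hstep]
      refine ⟨by simpa using R1, R2, R3, R4, fun b => (R5 b).trans ?_⟩
      exact set_set_perm h b (by omega) hcl (by omega)
    · rw [siftupLoop, if_neg hlt]
      refine ⟨rfl, hlen, by omega, ?_, fun b => List.Perm.refl _⟩
      intro j hj0 hjl hjne
      exact hi j hj0 hjl hjne (by omega)

lemma siftupLoop_spec (h : List (Int × Int)) (pos : Nat) (hinv : SUInv h pos) :
    SUPost h pos (siftupLoop h pos (2 * pos + 1) h.length) :=
  siftupLoop_go h.length (2 * pos + 1) h pos (by omega) hinv rfl

lemma siftup_spec (h : List (Int × Int)) (hs : SUInv h 0) :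
    IsHeap (siftup h 0) ∧ (siftup h 0).Perm (h.set 0 (gP h 0)) := by
  obtain ⟨R1, R2, R3, R4, R5⟩ := siftupLoop_spec h 0 hs
  have hdef : siftup h 0 = siftdownLoop
      ((siftupLoop h 0 (2 * 0 + 1) h.length).1.set (siftupLoop h 0 (2 * 0 + 1) h.length).2
        (gP h 0)) 0 (siftupLoop h 0 (2 * 0 + 1) h.length).2 (gP h 0) := rfl
  set r := siftupLoop h 0 (2 * 0 + 1) h.length with hr
  have hsd : SDInv (r.1.set r.2 (gP h 0)) r.2 (gP h 0) := by
    refine ⟨by simp [R1]; omega, ?_, ?_⟩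
    · intro j hj0 hjl hjne
      simp only [List.length_set, R1] at hjl
      rw [gP_set_ne _ _ (by omega), gP_set_ne _ _ (by omega)]
      exact R4 j hj0 hjl hjne
    · intro j hj0 hjl hjpar
      simp only [List.length_set, R1] at hjl
      omega
  obtain ⟨H1, H2⟩ := siftdown_spec r.2 _ _ hsd
  rw [hdef]
  refine ⟨H1, H2.trans ?_⟩
  rw [List.set_set]
  exact R5 (gP h 0)

lemma heappop_spec (h : List (Int × Int)) (hne : h ≠ []) (hh : IsHeap h) :
    (heappop h).1 = gP h 0 ∧ IsHeap (heappop h).2 ∧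
    ((heappop h).1 :: (heappop h).2).Perm h := by
  obtain ⟨ys, y, rfl⟩ : ∃ ys y, h = ys ++ [y] :=
    ⟨h.dropLast, h.getLast hne, (List.dropLast_append_getLast hne).symm⟩
  have hlast : (ys ++ [y]).getLastD (0, 0) = y := by simp
  have hdrop : (ys ++ [y]).dropLast = ys := by simp
  by_cases hys : ys = []
  · subst hys
    refine ⟨rfl, ?_, List.Perm.refl _⟩
    intro i hi0 hil
    simp [heappop] at hil
  · have hyslen : 0 < ys.length := List.length_pos_iff.mpr hys
    have hpop : heappop (ys ++ [y])
        = (ys.getD 0 (0, 0), siftup (ys.set 0 y) 0) := by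
      rw [heappop, hlast, hdrop, if_neg (by simp [hys])]
    have hsu : SUInv (ys.set 0 y) 0 := by
      refine ⟨by simpa using hyslen, ?_, ?_⟩
      · intro j hj0 hjl hjne hjpar
        simp only [List.length_set] at hjl
        rw [gP_set_ne _ _ (by omega), gP_set_ne _ _ (by omega)]
        have e1 : gP ys j = gP (ys ++ [y]) j := (gP_append_lt ys y hjl).symm
        have e2 : gP ys ((j - 1) / 2) = gP (ys ++ [y]) ((j - 1) / 2) :=
          (gP_append_lt ys y (by omega)).symm
        rw [e1, e2]
        exact hh j hj0 (by simp; omega)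
      · intro j hj0 hjl hjpar hq
        omega
    obtain ⟨S1, S2⟩ := siftup_spec (ys.set 0 y) hsu
    have hg0 : gP (ys.set 0 y) 0 = y := gP_set_self ys y hyslen
    rw [hg0, List.set_set] at S2
    have hgy : gP (ys ++ [y]) 0 = gP ys 0 := gP_append_lt ys y hyslen
    rw [hpop]
    refine ⟨hgy.symm, S1, ?_⟩
    refine (List.Perm.cons _ S2).trans ?_
    obtain ⟨a, t, rfl⟩ : ∃ a t, ys = a :: t := by
      cases ys with
      | nil => exact absurd rfl hys
      | cons a t => exact ⟨a, t, rfl⟩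
    show (a :: y :: t).Perm ((a :: t) ++ [y])
    exact List.Perm.cons a (List.perm_append_singleton y t).symm

-- the root of a heap is a minimum
lemma heap_root_min (h : List (Int × Int)) (hh : IsHeap h) :
    ∀ y ∈ h, pltB y (gP h 0) = false := by
  have key : ∀ i, i < h.length → pltB (gP h i) (gP h 0) = false := by
    intro i
    induction i using Nat.strong_induction_on with
    | _ i ih =>
    intro hi
    by_cases hi0 : i = 0
    · rw [hi0]; exact plt_irrefl _
    · exact ple_trans (ih ((i - 1) / 2) (by omega) (by omega)) (hh i (by omega) hi)
  intro z hz
  obtain ⟨i, hi, rfl⟩ := List.mem_iff_getElem.mp hz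
  rw [← gP_eq_getElem h i hi]
  exact key i hi

-- B side: the pending list is sorted (non-decreasing in the pair order)
def SortedP (s : List (Int × Int)) : Prop :=
  s.Pairwise (fun a b => pltB b a = false)

lemma sorted_gP (s : List (Int × Int)) (hs : SortedP s) {i j : Nat}
    (hij : i ≤ j) (hj : j < s.length) : pltB (gP s j) (gP s i) = false := by
  rcases Nat.lt_or_ge i j with hlt | hge
  · rw [gP_eq_getElem s i (by omega), gP_eq_getElem s j hj]
    exact (List.pairwise_iff_getElem.mp hs) i j (by omega) hj hlt
  · have : i = j := by omega
    subst this; exact plt_irrefl _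

lemma bisLoop_go (pend : List (Int × Int)) (item : Int × Int) (hs : SortedP pend) :
    ∀ (n lo hi : Nat), hi - lo ≤ n → lo ≤ hi → hi ≤ pend.length →
    (∀ k, k < lo → pltB item (gP pend k) = false) →
    (∀ k, hi ≤ k → k < pend.length → pltB item (gP pend k) = true) →
    bisLoop pend item lo hi ≤ pend.length ∧
    (∀ k, k < bisLoop pend item lo hi → pltB item (gP pend k) = false) ∧
    (∀ k, bisLoop pend item lo hi ≤ k → k < pend.length → pltB item (gP pend k) = true) := by
  intro n
  induction n with
  | zero =>
    intro lo hi hn hlh hhl hlow hup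
    rw [bisLoop, if_neg (by omega)]
    exact ⟨by omega, hlow, fun k hk1 hk2 => hup k (by omega) hk2⟩
  | succ n ih =>
    intro lo hi hn hlh hhl hlow hup
    by_cases hlt : lo < hi
    · rw [bisLoop, if_pos hlt]
      simp only [gP_def]
      have hmid : lo ≤ (lo + hi) / 2 ∧ (lo + hi) / 2 < hi := by omega
      by_cases hcmp : pltB item (gP pend ((lo + hi) / 2)) = true
      · rw [if_pos hcmp]
        refine ih lo ((lo + hi) / 2) (by omega) (by omega) (by omega) hlow ?_
        intro k hk1 hk2
        exact plt_of_plt_of_ple hcmp (sorted_gP pend hs hk1 hk2)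
      · rw [if_neg hcmp]
        have hcf : pltB item (gP pend ((lo + hi) / 2)) = false := by simpa using hcmp
        refine ih ((lo + hi) / 2 + 1) hi (by omega) (by omega) hhl ?_ hup
        intro k hk
        rcases Nat.lt_or_ge k lo with hk2 | hk2
        · exact hlow k hk2
        · exact ple_trans (sorted_gP pend hs (by omega) (by omega)) hcf
    · rw [bisLoop, if_neg hlt]
      exact ⟨by omega, hlow, fun k hk1 hk2 => hup k (by omega) hk2⟩

lemma bisLoop_spec (pend : List (Int × Int)) (item : Int × Int) (hs : SortedP pend) :
    bisLoop pend item 0 pend.length ≤ pend.length ∧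
    (∀ k, k < bisLoop pend item 0 pend.length → pltB item (gP pend k) = false) ∧
    (∀ k, bisLoop pend item 0 pend.length ≤ k → k < pend.length →
      pltB item (gP pend k) = true) :=
  bisLoop_go pend item hs pend.length 0 pend.length (by omega) (by omega) (by omega)
    (by omega) (fun k hk1 hk2 => absurd hk1 (by omega))

lemma gP_cons_succ (y : Int × Int) (ys : List (Int × Int)) (k : Nat) :
    gP (y :: ys) (k + 1) = gP ys k := by
  simp [gP, List.getD_eq_getElem?_getD]

lemma insort_spec : ∀ (s : List (Int × Int)) (r : Nat) (item : Int × Int),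
    SortedP s → r ≤ s.length →
    (∀ k, k < r → pltB item (gP s k) = false) →
    (∀ k, r ≤ k → k < s.length → pltB item (gP s k) = true) →
    SortedP (s.insertIdx r item) ∧ (s.insertIdx r item).Perm (item :: s) := by
  intro s
  induction s with
  | nil =>
    intro r item _ hr _ _
    have : r = 0 := by simpa using hr
    subst this
    exact ⟨List.pairwise_singleton _ _, List.Perm.refl _⟩
  | cons y ys ihs =>
    intro r item hs hr hlow hup
    cases r with
    | zero =>
      refine ⟨?_, List.Perm.refl _⟩
      rw [List.insertIdx_zero, SortedP, List.pairwise_cons]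
      refine ⟨?_, hs⟩
      intro z hz
      obtain ⟨i, hi, rfl⟩ := List.mem_iff_getElem.mp hz
      rw [← gP_eq_getElem _ i hi]
      exact plt_asymm (hup i (by omega) hi)
    | succ k =>
      rw [List.insertIdx_succ_cons]
      have hys : SortedP ys := (List.pairwise_cons.mp hs).2
      have hk : k ≤ ys.length := by simpa using hr
      obtain ⟨IH1, IH2⟩ := ihs k item hys hk
        (fun j hj => by rw [← gP_cons_succ y]; exact hlow (j + 1) (by omega))
        (fun j hj1 hj2 => by rw [← gP_cons_succ y]; exact hup (j + 1) (by omega) (by simpa using hj2))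
      refine ⟨?_, ?_⟩
      · rw [SortedP, List.pairwise_cons]
        refine ⟨?_, IH1⟩
        intro z hz
        rcases List.mem_cons.mp (IH2.mem_iff.mp hz) with hz1 | hz1
        · rw [hz1]
          exact hlow 0 (by omega)
        · exact (List.pairwise_cons.mp hs).1 z hz1
      · exact (List.Perm.cons y IH2).trans (List.Perm.swap item y ys)

-- the main loop correspondence
lemma loop_eq : ∀ (ps : List Int) (heap pend : List (Int × Int)),
    IsHeap heap → SortedP pend → heap.Perm pend →
    solLoopA ps heap = solLoopB ps pend := by
  intro ps
  induction ps with
  | nil => intro heap pend _ _ _; rfl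
  | cons p ps ih =>
    intro heap pend hh hs hperm
    by_cases hp : p = 0
    · subst hp
      rw [solLoopA, if_pos (show (0 : Int) = 0 from rfl)]
      cases pend with
      | nil =>
        have hemp : heap = [] := hperm.eq_nil
        subst hemp
        have hB : solLoopB ((0 : Int) :: ps) [] = "0" :: solLoopB ps [] := rfl
        rw [hB, if_pos (show ([] : List (Int × Int)).isEmpty = true from rfl)]
        exact congrArg _ (ih [] [] hh hs hperm)
      | cons q qs =>
        have hne : heap ≠ [] := by
          intro hcon
          exact absurd (hcon ▸ hperm).symm.eq_nil (by simp)
        have hnemp : heap.isEmpty = false := by simpa [List.isEmpty_iff] using hne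
        have hB : solLoopB ((0 : Int) :: ps) (q :: qs)
            = PySem.Int.toStr q.2 :: solLoopB ps qs := rfl
        rw [hB, hnemp, if_neg Bool.false_ne_true]
        show PySem.Int.toStr (heappop heap).1.2 :: solLoopA ps (heappop heap).2
            = PySem.Int.toStr q.2 :: solLoopB ps qs
        obtain ⟨P1, P2, P3⟩ := heappop_spec heap hne hh
        have hql : pltB q (gP heap 0) = false :=
          heap_root_min heap hh q (hperm.mem_iff.mpr (List.mem_cons_self))
        have htop : gP heap 0 ∈ q :: qs :=
          hperm.mem_iff.mp (gP_mem heap (by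
            have := hperm.length_eq
            simp at this
            omega))
        have hqt : pltB (gP heap 0) q = false := by
          rcases List.mem_cons.mp htop with he | hm
          · rw [he]; exact plt_irrefl _
          · exact (List.pairwise_cons.mp hs).1 _ hm
        have hqe : q = gP heap 0 := ple_antisymm hql hqt
        rw [P1, ← hqe]
        have hrest : (heappop heap).2.Perm qs := by
          have hpq : ((heappop heap).1 :: (heappop heap).2).Perm (q :: qs) := P3.trans hperm
          rw [P1, ← hqe] at hpq
          exact hpq.cons_inv
        exact congrArg _ (ih (heappop heap).2 qs P2 (List.pairwise_cons.mp hs).2 hrest)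
    · have hB : solLoopB (p :: ps) pend
          = solLoopB ps (pend.insertIdx (bisLoop pend (|p|, p) 0 pend.length) (|p|, p)) := by
        show (if p = 0 then _ else _) = _
        rw [if_neg hp]
      rw [solLoopA, if_neg hp, hB]
      obtain ⟨B1, B2, B3⟩ := bisLoop_spec pend (|p|, p) hs
      obtain ⟨I1, I2⟩ := insort_spec pend (bisLoop pend (|p|, p) 0 pend.length) (|p|, p) hs B1 B2 B3
      obtain ⟨H1, H2⟩ := heappush_spec heap (|p|, p) hh
      exact ih _ _ H1 I1 (H2.trans ((List.Perm.cons _ hperm).trans I2.symm))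

-- ===== VERDICT (by name: the statement is the Claim_ definition above) =====
theorem solution_spec : Claim_equal_solution := by
  intro params _
  unfold Spec_solution solution solution_alt
  exact loop_eq params [] [] (fun i h1 h2 => by simp at h2) List.Pairwise.nil (List.Perm.refl _)
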